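-- pv_equiv track=rewrite | github.com/geunskoo/algorithm | 25757번： 임스와 함께하는 미니게임/임스와 함께하는 미니게임.py | solution
-- ===== SOURCE A (Python) =====
-- def getPlayerNum(playType):
--     if playType == 'Y':
--         return 1
--     elif playType == 'F':
--         return 2
--     elif playType == 'O':
--         return 3
--
-- def solution(gameType, participants):
--
--     playedPerson = set()
--     waittingRoom = []
--     playCount = 0
--     playerNum = getPlayerNum(gameType)
--     for person in participants:
--         if person in playedPerson:
--             continue
--
--         waittingRoom.append(person)
--         playedPerson.add(person)
--         if len(waittingRoom) == playerNum:
--             waittingRoom = []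
--             playCount += 1
--
--     return playCount
-- ===== SOURCE B (Python) =====
-- def getPlayerNum(playType):
--     if playType == 'Y':
--         return 1
--     elif playType == 'F':
--         return 2
--     elif playType == 'O':
--         return 3
--
-- def solution(gameType, participants):
--     playerNum = getPlayerNum(gameType)
--     if playerNum is None:
--         return 0
--     return len(set(participants)) // playerNum
-- ===== Notes on version B (the rewrite author's own statement) =====
-- stated objective: simpler
-- what changed: Replaces the waiting-room accumulate-and-reset loop with a closed form: the number of distinct participants divided by the group size (0 when the game type is invalid).
import Mathlib
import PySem

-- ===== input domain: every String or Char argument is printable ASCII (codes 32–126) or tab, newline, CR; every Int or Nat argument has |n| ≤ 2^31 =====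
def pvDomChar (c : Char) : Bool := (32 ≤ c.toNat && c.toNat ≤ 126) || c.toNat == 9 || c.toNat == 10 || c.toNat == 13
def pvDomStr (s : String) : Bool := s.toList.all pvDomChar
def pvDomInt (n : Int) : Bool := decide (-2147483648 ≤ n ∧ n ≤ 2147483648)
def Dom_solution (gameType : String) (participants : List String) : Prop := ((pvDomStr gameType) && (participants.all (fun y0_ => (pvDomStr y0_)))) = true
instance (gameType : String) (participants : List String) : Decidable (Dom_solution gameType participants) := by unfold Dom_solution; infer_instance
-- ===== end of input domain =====

-- B replaces A's waiting-room accumulate-and-reset loop by a closed form: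
-- distinct-participant count floor-divided by the group size (0 on an invalid game type).

-- shared helper (identical in Source A and Source B): getPlayerNum, None -> Option.none
def getPlayerNum (playType : String) : Option Int :=
  if playType == "Y" then some 1
  else if playType == "F" then some 2
  else if playType == "O" then some 3
  else none

-- ===== PORT A =====
def solutionLoop : List String → PySem.Set String → List String → Int → Option Int → Int
  | [], _, _, playCount, _ => playCount
  | person :: rest, played, waiting, playCount, playerNum =>
    if PySem.Set.contains played person then
      solutionLoop rest played waiting playCount playerNum
    else
      let waiting' := waiting ++ [person]
      let played' := PySem.Set.add played person
      if (some ((waiting'.length : Int)) == playerNum) then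
        solutionLoop rest played' [] (playCount + 1) playerNum
      else
        solutionLoop rest played' waiting' playCount playerNum

def solution (gameType : String) (participants : List String) : Int :=
  solutionLoop participants PySem.Set.empty [] 0 (getPlayerNum gameType)

-- ===== PORT B =====
def solution_alt (gameType : String) (participants : List String) : Int :=
  match getPlayerNum gameType with
  | none => 0
  | some k => PySem.Int.floordiv ((PySem.Set.ofList participants).length : Int) k

-- ===== PRECONDITION & SPEC =====
def Spec_solution (gameType : String) (participants : List String) (out : Int) : Prop := out = solution_alt gameType participants
instance (gameType : String) (participants : List String) (out : Int) : Decidable (Spec_solution gameType participants out) := by unfold Spec_solution; infer_instance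

-- ===== CLAIM (what is proved, stated in full; the proofs are below) =====
def Claim_equal_solution : Prop := ∀ (gameType : String) (participants : List String), Dom_solution gameType participants → Spec_solution gameType participants (solution gameType participants)

-- ===== LEMMAS AND PROOFS =====

-- number of NEW distinct elements of xs relative to the already-seen set s
def newDistinct : List String → PySem.Set String → Nat
  | [], _ => 0
  | x :: xs, s =>
    if PySem.Set.contains s x then newDistinct xs s
    else 1 + newDistinct xs (PySem.Set.add s x)

theorem loop_cons_mem (x : String) (xs : List String) (played : PySem.Set String)
    (waiting : List String) (c : Int) (pn : Option Int)
    (h : x ∈ played) :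
    solutionLoop (x :: xs) played waiting c pn = solutionLoop xs played waiting c pn := by
  simp [solutionLoop, h]

theorem loop_cons_new (x : String) (xs : List String) (played : PySem.Set String)
    (waiting : List String) (c : Int) (pn : Option Int)
    (h : x ∉ played) :
    solutionLoop (x :: xs) played waiting c pn =
      if some ((waiting.length : Int) + 1) = pn then
        solutionLoop xs (PySem.Set.add played x) [] (c + 1) pn
      else
        solutionLoop xs (PySem.Set.add played x) (waiting ++ [x]) c pn := by
  simp [solutionLoop, h]

theorem nd_cons_mem (x : String) (xs : List String) (s : PySem.Set String)
    (h : x ∈ s) :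
    newDistinct (x :: xs) s = newDistinct xs s := by
  simp [newDistinct, h]

theorem nd_cons_new (x : String) (xs : List String) (s : PySem.Set String)
    (h : x ∉ s) :
    newDistinct (x :: xs) s = 1 + newDistinct xs (PySem.Set.add s x) := by
  simp [newDistinct, h]

theorem add_length_new (s : PySem.Set String) (x : String)
    (h : x ∉ s) :
    (PySem.Set.add s x).length = s.length + 1 := by
  simp [PySem.Set.add, h]

theorem add_eq_of_mem (s : PySem.Set String) (x : String)
    (h : x ∈ s) :
    PySem.Set.add s x = s := by
  simp [PySem.Set.add, h]

theorem length_foldl_add (xs : List String) (s : PySem.Set String) :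
    (xs.foldl PySem.Set.add s).length = s.length + newDistinct xs s := by
  induction xs generalizing s with
  | nil => simp [newDistinct]
  | cons x xs ih =>
    by_cases hb : x ∈ s
    · rw [List.foldl_cons, ih, nd_cons_mem x xs s hb, add_eq_of_mem s x hb]
    · rw [List.foldl_cons, ih, nd_cons_new x xs s hb, add_length_new s x hb]
      omega

theorem solutionLoop_none (xs : List String) (played : PySem.Set String)
    (waiting : List String) (c : Int) :
    solutionLoop xs played waiting c none = c := by
  induction xs generalizing played waiting with
  | nil => rfl
  | cons x xs ih =>
    by_cases hb : x ∈ played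
    · rw [loop_cons_mem x xs played waiting c none hb, ih]
    · rw [loop_cons_new x xs played waiting c none hb]
      simp [ih]

theorem solutionLoop_some (k : Nat) (hk : 0 < k) (xs : List String) :
    ∀ (played : PySem.Set String) (waiting : List String) (c : Int),
    waiting.length < k →
    solutionLoop xs played waiting c (some (k : Int)) =
      c + (((waiting.length + newDistinct xs played) / k : Nat) : Int) := by
  induction xs with
  | nil =>
    intro played waiting c hw
    simp [solutionLoop, newDistinct, Nat.div_eq_of_lt hw]
  | cons x xs ih =>
    intro played waiting c hw
    by_cases hb : x ∈ played
    · rw [loop_cons_mem x xs played waiting c (some (k : Int)) hb,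
        nd_cons_mem x xs played hb, ih played waiting c hw]
    · rw [loop_cons_new x xs played waiting c (some (k : Int)) hb,
        nd_cons_new x xs played hb]
      by_cases hfull : waiting.length + 1 = k
      · rw [if_pos (by simp only [Option.some.injEq]; omega),
          ih (PySem.Set.add played x) [] (c + 1) hk]
        have hdiv : (waiting.length + (1 + newDistinct xs (PySem.Set.add played x))) / k
            = (([] : List String).length + newDistinct xs (PySem.Set.add played x)) / k + 1 := by
          have h2 : waiting.length + (1 + newDistinct xs (PySem.Set.add played x))
              = (([] : List String).length + newDistinct xs (PySem.Set.add played x)) + k := by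
            simp; omega
          rw [h2, Nat.add_div_right _ hk]
        rw [hdiv]
        push_cast
        ring
      · rw [if_neg (by simp only [Option.some.injEq]; omega),
          ih (PySem.Set.add played x) (waiting ++ [x]) c (by simp; omega)]
        have h2 : (waiting ++ [x]).length + newDistinct xs (PySem.Set.add played x)
            = waiting.length + (1 + newDistinct xs (PySem.Set.add played x)) := by
          simp; omega
        rw [h2]

theorem solution_eq_alt_of_some (k : Nat) (hk : 0 < k) (gameType : String)
    (participants : List String) (hg : getPlayerNum gameType = some (k : Int)) :
    solution gameType participants = solution_alt gameType participants := by
  unfold solution solution_alt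
  rw [hg]
  rw [solutionLoop_some k hk participants PySem.Set.empty [] 0 hk]
  have hlen : (PySem.Set.ofList participants).length = newDistinct participants PySem.Set.empty := by
    rw [PySem.Set.ofList_eq_foldl, length_foldl_add]
    simp [PySem.Set.empty]
  rw [hlen]
  show (0 : Int) + (((List.length ([] : List String) + newDistinct participants PySem.Set.empty) / k : Nat) : Int)
      = PySem.Int.floordiv ((newDistinct participants PySem.Set.empty : Nat) : Int) ((k : Nat) : Int)
  rw [PySem.Int.floordiv_natCast]
  simp

-- ===== VERDICT (by name: the statement is the Claim_ definition above) =====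
theorem solution_spec : Claim_equal_solution := by
  intro gameType participants _
  unfold Spec_solution
  by_cases h1 : gameType = "Y"
  · exact (solution_eq_alt_of_some 1 (by omega) gameType participants
      (by simp [getPlayerNum, h1]))
  · by_cases h2 : gameType = "F"
    · exact (solution_eq_alt_of_some 2 (by omega) gameType participants
        (by simp [getPlayerNum, h2]))
    · by_cases h3 : gameType = "O"
      · exact (solution_eq_alt_of_some 3 (by omega) gameType participants
          (by simp [getPlayerNum, h3]))
      · have hg : getPlayerNum gameType = none := by simp [getPlayerNum, h1, h2, h3]
        unfold solution solution_alt
        rw [hg, solutionLoop_none]
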